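-- pv_equiv track=rewrite | github.com/dalgama/AI-poker-game | CommonLibrary/CommonMethods.py | separationOfZeros
-- ===== SOURCE A (Python) =====
-- def absoluteDifference(hand):
--     #Initiliaze an array of 4 elems (initially set to 0)
--     absDif = [0]*(len(hand)-1)
--     #make sure to sort the hand first
--     hand = sorted(hand)
--     for i in range(1, len(hand)):
--         absDif[i-1] = abs(hand[i]-hand[i-1])
--
--     return absDif
--
-- def numZeros(hand):
--     absDif = absoluteDifference(hand)
--     count = 0
--     for elem in absDif:
--         if (elem == 0):
--             count += 1
--     return count
--
-- def indexOfZeros(absDif):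
--     indexList = []
--     for i in range(0, len(absDif)):
--         if (absDif[i] == 0):
--             indexList.append(i)
--     return indexList
--
-- def separationOfZeros(hand):
--     absDif = absoluteDifference(hand)
--     if numZeros(hand) > 1:
--         indexListAbsDif = absoluteDifference(indexOfZeros(absDif))
--         for elem in indexListAbsDif:
--             if (elem != 1):
--                 return True
--     return False
-- ===== SOURCE B (Python) =====
-- from collections import Counter
--
-- def separationOfZeros(hand):
--     counts = Counter(hand)
--     return sum(1 for c in counts.values() if c >= 2) >= 2
-- ===== Notes on version B (the rewrite author's own statement) =====
-- stated objective: faster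
-- what changed: Replaces the sort, the absolute-difference array, the zero count and the index-gap scan with a single Counter pass: True iff at least two distinct values occur at least twice.
import Mathlib
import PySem

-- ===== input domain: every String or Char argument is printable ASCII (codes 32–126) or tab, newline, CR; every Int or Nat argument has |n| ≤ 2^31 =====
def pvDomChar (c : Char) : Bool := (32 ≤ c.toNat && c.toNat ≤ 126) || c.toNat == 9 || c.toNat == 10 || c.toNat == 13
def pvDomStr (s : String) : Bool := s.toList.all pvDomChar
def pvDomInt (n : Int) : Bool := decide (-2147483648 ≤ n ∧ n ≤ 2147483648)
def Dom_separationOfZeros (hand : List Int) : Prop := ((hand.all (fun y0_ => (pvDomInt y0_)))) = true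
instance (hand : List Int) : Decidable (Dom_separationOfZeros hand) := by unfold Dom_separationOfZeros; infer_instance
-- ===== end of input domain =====

-- B replaces A's sort + absolute-difference array + zero count + index-gap scan by a single
-- frequency count: True iff at least two distinct values occur at least twice (objective: simpler).

-- ===== PORT A =====
-- [0]*(len(hand)-1): Python's negative repeat count yields [], matched by Nat truncated subtraction
def absoluteDifference (hand : List Int) : List Int :=
  let absDif := List.replicate (hand.length - 1) (0 : Int)
  let hand := PySem.List.sorted hand (fun x => x)
  (PySem.List.pyRange 1 (PySem.List.len hand)).foldl
    (fun absDif i =>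
      PySem.List.pySetD absDif (i - 1) |PySem.List.pyGetD hand i 0 - PySem.List.pyGetD hand (i - 1) 0|)
    absDif

def numZeros (hand : List Int) : Int :=
  let absDif := absoluteDifference hand
  absDif.foldl (fun count elem => if elem = 0 then count + 1 else count) 0

def indexOfZeros (absDif : List Int) : List Int :=
  (PySem.List.pyRange 0 (PySem.List.len absDif)).foldl
    (fun indexList i => if PySem.List.pyGetD absDif i 0 = 0 then indexList ++ [i] else indexList) []

-- the 'for elem …: if elem != 1: return True / return False' loop is the any-scan
def separationOfZeros (hand : List Int) : Bool :=
  let absDif := absoluteDifference hand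
  if numZeros hand > 1 then
    let indexListAbsDif := absoluteDifference (indexOfZeros absDif)
    indexListAbsDif.any (fun elem => elem ≠ 1)
  else false

-- ===== PORT B =====
def separationOfZeros_alt (hand : List Int) : Bool :=
  let counts := PySem.Dict.counter hand
  decide (2 ≤ counts.values.countP (fun c => decide (2 ≤ c)))

-- ===== PRECONDITION & SPEC =====
def Spec_separationOfZeros (hand : List Int) (out : Bool) : Prop := out = separationOfZeros_alt hand
instance (hand : List Int) (out : Bool) : Decidable (Spec_separationOfZeros hand out) := by unfold Spec_separationOfZeros; infer_instance

-- ===== CLAIM (what is proved, stated in full; the proofs are below) =====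
def Claim_equal_separationOfZeros : Prop := ∀ (hand : List Int), Dom_separationOfZeros hand → Spec_separationOfZeros hand (separationOfZeros hand)

-- ===== LEMMAS AND PROOFS =====

-- the sorted hand and its list of adjacent absolute differences
def pvS (hand : List Int) : List Int := PySem.List.sorted hand (fun x => x)

def pvDiffs (s : List Int) : List Int :=
  (List.range (s.length - 1)).map (fun j => |s.getD (j + 1) 0 - s.getD j 0|)

-- the zero positions of the difference list of the sorted hand, as a Nat list
def pvW (hand : List Int) : List ℕ :=
  (List.range ((pvS hand).length - 1)).filter
    (fun j => decide ((pvS hand).getD (j + 1) 0 = (pvS hand).getD j 0))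

-- the shared midpoint specification: two adjacent equal pairs with different values
def pvTwo (hand : List Int) : Prop :=
  ∃ j1 j2 : ℕ, j1 < j2 ∧ j2 + 1 < (pvS hand).length ∧
    (pvS hand).getD (j1 + 1) 0 = (pvS hand).getD j1 0 ∧
    (pvS hand).getD (j2 + 1) 0 = (pvS hand).getD j2 0 ∧
    (pvS hand).getD j1 0 ≠ (pvS hand).getD j2 0

-- the write-each-slot-once loop fills the array with f 1, …, f (m-1)
lemma pv_fill (f : Int → Int) : ∀ (m : Nat) (arr : List Int), m - 1 ≤ arr.length →
    (PySem.List.pyRange 1 (m : Int)).foldl (fun a i => PySem.List.pySetD a (i - 1) (f i)) arr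
      = (List.range (m - 1)).map (fun j : Nat => f ((j : Int) + 1)) ++ arr.drop (m - 1) := by
  intro m
  induction m with
  | zero => intro arr _; rw [PySem.List.pyRange_one_eq_nil (by norm_num)]; simp
  | succ m ih =>
    intro arr harr
    rcases Nat.eq_zero_or_pos m with hm | hm
    · subst hm; rw [PySem.List.pyRange_one_eq_nil (by norm_num)]; simp
    · have hcast : ((m : Int) + 1) = ((m + 1 : Nat) : Int) := by push_cast; ring
      rw [← hcast, PySem.List.pyRange_one_succ_right (by exact_mod_cast hm), List.foldl_append]
      have harr' : m - 1 ≤ arr.length := by omega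
      rw [ih arr harr']
      simp only [List.foldl_cons, List.foldl_nil]
      have h1 : (m : Int) - 1 = ((m - 1 : Nat) : Int) := by omega
      rw [h1, PySem.List.pySetD_natCast]
      have hmm : m - 1 + 1 = m := by omega
      have hdrop : arr.drop (m - 1) = arr[m - 1]'(by omega) :: arr.drop m := by
        rw [List.drop_eq_getElem_cons (by omega), hmm]
      rw [hdrop, List.set_append]
      have hplen : ((List.range (m - 1)).map (fun j : Nat => f ((j : Int) + 1))).length = m - 1 := by simp
      rw [if_neg (by omega), hplen, Nat.sub_self, List.set_cons_zero]
      have h2 : (m + 1) - 1 = (m - 1) + 1 := by omega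
      rw [h2, List.range_succ, List.map_append, List.map_singleton]
      rw [List.append_assoc, List.singleton_append, hmm]
      have h3 : ((m - 1 : Nat) : Int) + 1 = (m : Int) := by omega
      rw [h3]

lemma pv_absd (hand : List Int) : absoluteDifference hand = pvDiffs (pvS hand) := by
  unfold absoluteDifference pvDiffs pvS
  have hlen : (PySem.List.sorted hand (fun x => x)).length = hand.length :=
    PySem.List.length_sorted hand (fun x => x) false
  simp only [PySem.List.len_eq]
  rw [pv_fill _ _ _ (by simp [hlen])]
  rw [List.drop_replicate]
  rw [hlen, Nat.sub_self, List.replicate_zero, List.append_nil]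
  apply List.map_congr_left
  intro j hj
  have hj' : j < hand.length - 1 := List.mem_range.mp hj
  have c1 : (j : Int) + 1 = ((j + 1 : Nat) : Int) := by push_cast; ring
  have c2 : (j : Int) + 1 - 1 = ((j : Nat) : Int) := by omega
  rw [c1, PySem.List.pyGetD_natCast, ← c1, c2, PySem.List.pyGetD_natCast]

-- two distinct members force length ≥ 2
lemma pv_two_mem {α : Type} {l : List α} {a b : α} (ha : a ∈ l) (hb : b ∈ l) (hab : a ≠ b) :
    2 ≤ l.length := by
  match l, ha with
  | x :: t, ha =>
    match t with
    | [] => simp_all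
    | y :: t' => simp

lemma pv_two_le_countP {l : List Int} {p : Int → Bool} (hnd : l.Nodup) :
    2 ≤ l.countP p ↔ ∃ a b, a ∈ l ∧ b ∈ l ∧ a ≠ b ∧ p a = true ∧ p b = true := by
  rw [List.countP_eq_length_filter]
  constructor
  · intro h
    have hf : (l.filter p).Nodup := hnd.filter p
    match hfe : l.filter p, h with
    | a :: b :: t, _ =>
      rw [hfe] at hf
      have hanb : a ∉ b :: t := (List.nodup_cons.mp hf).1
      have hab : a ≠ b := fun he => hanb (he ▸ List.mem_cons_self)
      refine ⟨a, b, ?_, ?_, hab, ?_, ?_⟩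
      · exact List.mem_of_mem_filter (hfe ▸ List.mem_cons_self)
      · exact List.mem_of_mem_filter (hfe ▸ List.mem_cons_of_mem _ List.mem_cons_self)
      · exact List.of_mem_filter (hfe ▸ List.mem_cons_self)
      · exact List.of_mem_filter (hfe ▸ List.mem_cons_of_mem _ List.mem_cons_self)
  · rintro ⟨a, b, ha, hb, hab, hpa, hpb⟩
    exact pv_two_mem (List.mem_filter.mpr ⟨ha, hpa⟩) (List.mem_filter.mpr ⟨hb, hpb⟩) hab

-- a [a, b] sublist gives two ordered positions
lemma pv_pair_sublist {a b : Int} : ∀ {l : List Int}, List.Sublist [a, b] l →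
    ∃ p q : ℕ, p < q ∧ q < l.length ∧ l.getD p 0 = a ∧ l.getD q 0 = b := by
  intro l
  induction l with
  | nil => intro h; simp at h
  | cons x t ih =>
    intro h
    rcases List.sublist_cons_iff.mp h with h' | ⟨r, hr, hrt⟩
    · obtain ⟨p, q, hpq, hq, hga, hgb⟩ := ih h'
      exact ⟨p + 1, q + 1, by omega, by simp; omega, by simpa using hga, by simpa using hgb⟩
    · obtain ⟨rfl, rfl⟩ : x = a ∧ r = [b] := by
        cases hr
        exact ⟨rfl, rfl⟩
      have hbt : b ∈ t := hrt.subset List.mem_cons_self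
      obtain ⟨q, hq, hgb⟩ := List.getElem_of_mem hbt
      refine ⟨0, q + 1, by omega, by simp; omega, by simp, ?_⟩
      simp [List.getD, List.getElem?_eq_getElem hq, hgb]

-- monotonicity of the sorted hand under getD
lemma pv_mono (hand : List Int) {p q : ℕ} (hpq : p ≤ q) (hq : q < (pvS hand).length) :
    (pvS hand).getD p 0 ≤ (pvS hand).getD q 0 := by
  rw [List.getD_eq_getElem _ _ (by omega), List.getD_eq_getElem _ _ hq]
  exact PySem.List.sorted_id_getElem_mono hand hpq hq

lemma pv_count_s (hand : List Int) (v : Int) : (pvS hand).count v = hand.count v :=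
  (PySem.List.sorted_perm hand (fun x => x) false).count_eq v

-- 'v occurs at least twice in hand' ↔ 'some adjacent pair of the sorted hand equals v'
lemma pv_dup_iff (hand : List Int) (v : Int) :
    2 ≤ hand.count v ↔ ∃ j : ℕ, j + 1 < (pvS hand).length ∧
      (pvS hand).getD (j + 1) 0 = (pvS hand).getD j 0 ∧ (pvS hand).getD j 0 = v := by
  rw [← pv_count_s hand v, ← List.duplicate_iff_two_le_count, List.duplicate_iff_sublist]
  constructor
  · intro h
    obtain ⟨p, q, hpq, hq, hgp, hgq⟩ := pv_pair_sublist h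
    refine ⟨p, by omega, ?_, hgp⟩
    have h1 := pv_mono hand (by omega : p ≤ p + 1) (by omega : p + 1 < (pvS hand).length)
    have h2 := pv_mono hand (by omega : p + 1 ≤ q) hq
    omega
  · rintro ⟨j, hj, heq, hv⟩
    have hdrop : (pvS hand).drop j = v :: v :: (pvS hand).drop (j + 2) := by
      rw [List.drop_eq_getElem_cons (by omega : j < (pvS hand).length),
          List.drop_eq_getElem_cons (by omega : j + 1 < (pvS hand).length)]
      rw [List.getD_eq_getElem _ _ (by omega : j < (pvS hand).length)] at hv heq
      rw [List.getD_eq_getElem _ _ hj] at heq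
      rw [hv, heq, hv]
    have : List.Sublist [v, v] ((pvS hand).drop j) := by
      rw [hdrop]
      exact (List.nil_sublist _).cons₂ v |>.cons₂ v
    exact this.trans (List.drop_sublist _ _)

lemma pv_getD_diffs (s : List Int) {j : ℕ} (hj : j < s.length - 1) :
    (pvDiffs s).getD j 0 = |s.getD (j + 1) 0 - s.getD j 0| := by
  rw [pvDiffs, List.getD_eq_getElem _ _ (by simpa using hj), List.getElem_map]
  simp

lemma pv_ioz (hand : List Int) :
    indexOfZeros (pvDiffs (pvS hand)) = (pvW hand).map (fun j : ℕ => (j : Int)) := by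
  unfold indexOfZeros
  rw [PySem.List.foldl_append_ite_eq_filter (fun i => PySem.List.pyGetD (pvDiffs (pvS hand)) i 0 = 0)]
  rw [List.nil_append, PySem.List.len_eq]
  have hlen : (pvDiffs (pvS hand)).length = (pvS hand).length - 1 := by simp [pvDiffs]
  rw [hlen, PySem.List.pyRange_zero_nat, List.filter_map]
  rw [pvW]
  congr 1
  apply List.filter_congr
  intro j hj
  have hj' : j < (pvS hand).length - 1 := List.mem_range.mp hj
  simp only [Function.comp, PySem.List.pyGetD_natCast, decide_eq_decide]
  rw [List.getD_eq_getElem _ _ (by omega : j < (pvDiffs (pvS hand)).length)]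
  rw [← List.getD_eq_getElem _ 0, pv_getD_diffs _ hj']
  constructor
  · intro h
    have := abs_eq_zero.mp h
    omega
  · intro h; rw [h]; simp

lemma pv_numZeros (hand : List Int) : numZeros hand = ((pvW hand).length : Int) := by
  unfold numZeros
  rw [pv_absd, PySem.List.foldl_ite_add_one (fun e => e = 0)]
  rw [zero_add, pvW, pvDiffs, List.countP_map, ← List.countP_eq_length_filter]
  congr 1
  apply List.countP_congr
  intro j hj
  simp only [Function.comp, decide_eq_true_eq]
  rw [abs_eq_zero, sub_eq_zero]

lemma pv_mem_w (hand : List Int) (j : ℕ) :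
    j ∈ pvW hand ↔ j < (pvS hand).length - 1 ∧ (pvS hand).getD (j + 1) 0 = (pvS hand).getD j 0 := by
  simp [pvW, List.mem_filter, List.mem_range]

lemma pv_w_pairwise (hand : List Int) : (pvW hand).Pairwise (· < ·) :=
  (List.pairwise_lt_range).filter _

lemma pv_w_mono (hand : List Int) {i k : ℕ} (hik : i < k) (hk : k < (pvW hand).length) :
    (pvW hand).getD i 0 < (pvW hand).getD k 0 := by
  rw [List.getD_eq_getElem _ _ (by omega), List.getD_eq_getElem _ _ hk]
  exact List.pairwise_iff_getElem.mp (pv_w_pairwise hand) i k (by omega) hk hik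

-- if every index gap is 1, the sorted hand is constant along the zero indices
lemma pv_run_const (hand : List Int)
    (hstep : ∀ k, k + 1 < (pvW hand).length →
      (pvW hand).getD (k + 1) 0 = (pvW hand).getD k 0 + 1) :
    ∀ m, m < (pvW hand).length →
      (pvS hand).getD ((pvW hand).getD m 0) 0 = (pvS hand).getD ((pvW hand).getD 0 0) 0 := by
  intro m
  induction m with
  | zero => intro _; rfl
  | succ m ih =>
    intro hm
    have h1 := hstep m (by omega)
    have hmem : (pvW hand).getD m 0 ∈ pvW hand := by
      rw [List.getD_eq_getElem _ _ (by omega)]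
      exact List.getElem_mem _
    have hq := ((pv_mem_w hand _).mp hmem).2
    rw [h1, hq]
    exact ih (by omega)

lemma pv_getD_w_cast (hand : List Int) {k : ℕ} (hk : k < (pvW hand).length) :
    ((pvW hand).map (fun j : ℕ => (j : Int))).getD k 0 = (((pvW hand).getD k 0 : ℕ) : Int) := by
  rw [List.getD_eq_getElem _ _ (by simpa using hk), List.getElem_map,
      List.getD_eq_getElem _ _ hk]

lemma pv_getD_mem_w (hand : List Int) {k : ℕ} (hk : k < (pvW hand).length) :
    (pvW hand).getD k 0 ∈ pvW hand := by
  rw [List.getD_eq_getElem _ _ hk]; exact List.getElem_mem _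

lemma pv_A_iff (hand : List Int) : separationOfZeros hand = true ↔ pvTwo hand := by
  have hz : indexOfZeros (absoluteDifference hand) = (pvW hand).map (fun j : ℕ => (j : Int)) := by
    rw [pv_absd, pv_ioz]
  have hzsorted : pvS ((pvW hand).map (fun j : ℕ => (j : Int))) = (pvW hand).map (fun j : ℕ => (j : Int)) := by
    apply PySem.List.sorted_eq_self_of_pairwise
    exact ((pv_w_pairwise hand).map _ (fun a b h => by exact_mod_cast Nat.le_of_lt h))
  -- the any-scan over the gaps of the zero-index list
  have hany : ((absoluteDifference ((pvW hand).map (fun j : ℕ => (j : Int)))).any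
      (fun elem => elem ≠ 1) = true) ↔
      ∃ k, k + 1 < (pvW hand).length ∧ (pvW hand).getD (k + 1) 0 ≠ (pvW hand).getD k 0 + 1 := by
    rw [pv_absd, hzsorted]
    rw [List.any_eq_true]
    constructor
    · rintro ⟨e, hmem, he⟩
      rw [pvDiffs, List.mem_map] at hmem
      obtain ⟨k, hk, rfl⟩ := hmem
      have hk' : k + 1 < (pvW hand).length := by
        have := List.mem_range.mp hk
        simp only [List.length_map] at this
        omega
      refine ⟨k, hk', ?_⟩
      rw [pv_getD_w_cast hand hk', pv_getD_w_cast hand (by omega)] at he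
      have hlt := pv_w_mono hand (by omega : k < k + 1) hk'
      simp only [ne_eq, decide_eq_true_eq] at he
      intro hcon
      apply he
      rw [hcon]
      push_cast
      rw [abs_of_nonneg (by omega)]
      omega
    · rintro ⟨k, hk, hne⟩
      refine ⟨|((pvW hand).map (fun j : ℕ => (j : Int))).getD (k+1) 0
               - ((pvW hand).map (fun j : ℕ => (j : Int))).getD k 0|, ?_, ?_⟩
      · rw [pvDiffs, List.mem_map]
        exact ⟨k, List.mem_range.mpr (by simp only [List.length_map]; omega), rfl⟩
      · have hlt := pv_w_mono hand (by omega : k < k + 1) hk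
        rw [pv_getD_w_cast hand hk, pv_getD_w_cast hand (by omega)]
        simp only [ne_eq, decide_eq_true_eq]
        intro hcon
        apply hne
        rw [abs_of_nonneg (by omega)] at hcon
        omega
  -- unfold the top-level if
  unfold separationOfZeros
  simp only [hz]
  rw [pv_numZeros]
  by_cases hcond : (1 : Int) < ((pvW hand).length : Int)
  · rw [if_pos hcond, hany]
    have hwlen : 2 ≤ (pvW hand).length := by exact_mod_cast hcond
    constructor
    · rintro ⟨k, hk, hne⟩
      set a := (pvW hand).getD k 0 with ha
      set b := (pvW hand).getD (k + 1) 0 with hb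
      have hab : a < b := pv_w_mono hand (by omega) hk
      have hmema : a ∈ pvW hand := pv_getD_mem_w hand (by omega)
      have hmemb : b ∈ pvW hand := pv_getD_mem_w hand hk
      have hqa := (pv_mem_w hand a).mp hmema
      have hqb := (pv_mem_w hand b).mp hmemb
      refine ⟨a, b, hab, by omega, hqa.2, hqb.2, ?_⟩
      intro heqv
      -- all values between a and b+1 coincide; then a+1 is also a zero index
      have hab2 : a + 1 < b := by omega
      have hchain : ∀ i, a ≤ i → i ≤ b + 1 → (pvS hand).getD i 0 = (pvS hand).getD a 0 := by
        intro i h1 h2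
        have hup : (pvS hand).getD a 0 ≤ (pvS hand).getD i 0 := pv_mono hand h1 (by omega)
        have hdn : (pvS hand).getD i 0 ≤ (pvS hand).getD (b + 1) 0 := pv_mono hand h2 (by omega)
        have : (pvS hand).getD (b + 1) 0 = (pvS hand).getD a 0 := by rw [hqb.2, ← heqv]
        omega
      have hmem1 : a + 1 ∈ pvW hand := by
        rw [pv_mem_w]
        refine ⟨by omega, ?_⟩
        rw [hchain (a + 2) (by omega) (by omega), hchain (a + 1) (by omega) (by omega)]
      obtain ⟨m, hm, hwm⟩ := List.getElem_of_mem hmem1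
      have hwm' : (pvW hand).getD m 0 = a + 1 := by rw [List.getD_eq_getElem _ _ hm, hwm]
      rcases lt_trichotomy m k with h | h | h
      · have := pv_w_mono hand h (by omega); omega
      · subst h; omega
      · rcases Nat.lt_or_ge m (k + 1) with h' | h'
        · omega
        · rcases Nat.eq_or_lt_of_le h' with rfl | h''
          · omega
          · have := pv_w_mono hand h'' hm; omega
    · rintro ⟨j1, j2, hlt, hj2, he1, he2, hne⟩
      by_contra hno
      have hstep : ∀ k, k + 1 < (pvW hand).length →
          (pvW hand).getD (k + 1) 0 = (pvW hand).getD k 0 + 1 := by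
        intro k hk
        by_contra hne
        exact hno ⟨k, hk, hne⟩
      have hmem1 : j1 ∈ pvW hand := (pv_mem_w hand j1).mpr ⟨by omega, he1⟩
      have hmem2 : j2 ∈ pvW hand := (pv_mem_w hand j2).mpr ⟨by omega, he2⟩
      obtain ⟨m1, hm1, hw1⟩ := List.getElem_of_mem hmem1
      obtain ⟨m2, hm2, hw2⟩ := List.getElem_of_mem hmem2
      have hg1 : (pvW hand).getD m1 0 = j1 := by rw [List.getD_eq_getElem _ _ hm1, hw1]
      have hg2 : (pvW hand).getD m2 0 = j2 := by rw [List.getD_eq_getElem _ _ hm2, hw2]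
      have hc1 := pv_run_const hand hstep m1 hm1
      have hc2 := pv_run_const hand hstep m2 hm2
      rw [hg1] at hc1
      rw [hg2] at hc2
      exact hne (hc1.trans hc2.symm)
  · rw [if_neg hcond]
    simp only [Bool.false_eq_true, false_iff]
    rintro ⟨j1, j2, hlt, hj2, he1, he2, hne⟩
    apply hcond
    have hmem1 : j1 ∈ pvW hand := (pv_mem_w hand j1).mpr ⟨by omega, he1⟩
    have hmem2 : j2 ∈ pvW hand := (pv_mem_w hand j2).mpr ⟨by omega, he2⟩
    have := pv_two_mem hmem1 hmem2 (by omega)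
    exact_mod_cast by omega

lemma pv_B_iff (hand : List Int) : separationOfZeros_alt hand = true ↔ pvTwo hand := by
  unfold separationOfZeros_alt
  simp only [decide_eq_true_eq]
  rw [show (PySem.Dict.counter hand).values
        = (PySem.Dict.counter hand).items.map (·.2) from rfl,
      PySem.Dict.items_counter, List.map_map, List.countP_map]
  rw [pv_two_le_countP (PySem.Set.nodup_ofList hand)]
  constructor
  · rintro ⟨v1, v2, _, _, hne, hp1, hp2⟩
    simp only [Function.comp, decide_eq_true_eq] at hp1 hp2
    have hc1 : 2 ≤ hand.count v1 := by exact_mod_cast hp1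
    have hc2 : 2 ≤ hand.count v2 := by exact_mod_cast hp2
    obtain ⟨j1, hj1, he1, hv1⟩ := (pv_dup_iff hand v1).mp hc1
    obtain ⟨j2, hj2, he2, hv2⟩ := (pv_dup_iff hand v2).mp hc2
    rcases lt_trichotomy j1 j2 with h | h | h
    · exact ⟨j1, j2, h, hj2, he1, he2, by rw [hv1, hv2]; exact hne⟩
    · exact absurd (by rw [← hv1, ← hv2, h]) hne
    · exact ⟨j2, j1, h, hj1, he2, he1, by rw [hv1, hv2]; exact fun e => hne e.symm⟩
  · rintro ⟨j1, j2, hlt, hj2, he1, he2, hne⟩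
    have hc1 : 2 ≤ hand.count ((pvS hand).getD j1 0) :=
      (pv_dup_iff hand _).mpr ⟨j1, by omega, he1, rfl⟩
    have hc2 : 2 ≤ hand.count ((pvS hand).getD j2 0) :=
      (pv_dup_iff hand _).mpr ⟨j2, hj2, he2, rfl⟩
    refine ⟨_, _, ?_, ?_, hne, ?_, ?_⟩
    · exact (PySem.Set.mem_ofList hand _).mpr (List.count_pos_iff.mp (by omega))
    · exact (PySem.Set.mem_ofList hand _).mpr (List.count_pos_iff.mp (by omega))
    · simp only [Function.comp, decide_eq_true_eq]; exact_mod_cast hc1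
    · simp only [Function.comp, decide_eq_true_eq]; exact_mod_cast hc2

-- ===== VERDICT (by name: the statement is the Claim_ definition above) =====
theorem separationOfZeros_spec : Claim_equal_separationOfZeros := by
  intro hand _
  unfold Spec_separationOfZeros
  have h := (pv_A_iff hand).trans (pv_B_iff hand).symm
  cases hA : separationOfZeros hand <;> cases hB : separationOfZeros_alt hand <;> simp_all
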